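-- pv_equiv track=rewrite | github.com/sodown4thecause/enhanced-ai-tweet-monitor | ai_tools_monitor/ai_tweet_monitor.py | calculate_engagement_distribution
-- ===== SOURCE A (Python) =====
-- def calculate_engagement_distribution(tweets):
--     """Calculate engagement distribution for insights."""
--     if not tweets:
--         return {}
--
--     engagements = [tweet.get('engagement_score', tweet.get('engagement', 0)) for tweet in tweets]
--     engagements.sort()
--
--     return {
--         'min': min(engagements),
--         'max': max(engagements),
--         'median': engagements[len(engagements)//2],
--         'top_10_percent_threshold': engagements[int(len(engagements)*0.9)] if len(engagements) > 10 else max(engagements),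
--         'bottom_10_percent_threshold': engagements[int(len(engagements)*0.1)] if len(engagements) > 10 else min(engagements)
--     }
-- ===== SOURCE B (Python) =====
-- def _select(xs, k):
--     """k-th smallest (0-based) by iterative three-way quickselect, middle-element pivot."""
--     while True:
--         p = xs[len(xs) // 2]
--         lt = [x for x in xs if x < p]
--         if k < len(lt):
--             xs = lt
--             continue
--         eq = len([x for x in xs if x == p])
--         if k < len(lt) + eq:
--             return p
--         k -= len(lt) + eq
--         xs = [x for x in xs if x > p]
--
--
-- def calculate_engagement_distribution(tweets):
--     """Calculate engagement distribution for insights."""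
--     if not tweets:
--         return {}
--
--     engagements = [tweet.get('engagement_score', tweet.get('engagement', 0)) for tweet in tweets]
--     n = len(engagements)
--     top_k = int(n * 0.9) if n > 10 else n - 1
--     bot_k = int(n * 0.1) if n > 10 else 0
--
--     return {
--         'min': _select(engagements, 0),
--         'max': _select(engagements, n - 1),
--         'median': _select(engagements, n // 2),
--         'top_10_percent_threshold': _select(engagements, top_k),
--         'bottom_10_percent_threshold': _select(engagements, bot_k),
--     }
-- ===== Notes on version B (the rewrite author's own statement) =====
-- stated objective: alternative
-- what changed: Replaces A's full sort of the engagement list by an iterative three-way quickselect (middle-element pivot) that computes each required order statistic (min, max, median, 10th/90th percentile index) directly, with no sorted copy.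
import Mathlib
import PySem

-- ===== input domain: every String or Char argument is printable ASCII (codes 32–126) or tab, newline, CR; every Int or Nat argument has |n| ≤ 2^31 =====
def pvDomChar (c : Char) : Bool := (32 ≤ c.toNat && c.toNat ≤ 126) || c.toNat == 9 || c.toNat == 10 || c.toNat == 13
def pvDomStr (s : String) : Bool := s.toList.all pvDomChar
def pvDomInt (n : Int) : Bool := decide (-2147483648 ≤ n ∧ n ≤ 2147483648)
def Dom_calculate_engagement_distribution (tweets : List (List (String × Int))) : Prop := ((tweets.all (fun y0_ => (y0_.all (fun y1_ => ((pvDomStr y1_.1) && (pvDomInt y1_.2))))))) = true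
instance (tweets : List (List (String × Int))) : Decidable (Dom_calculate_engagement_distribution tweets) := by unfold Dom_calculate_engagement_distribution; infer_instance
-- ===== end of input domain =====

-- B replaces A's full sort by an iterative three-way quickselect computing each needed
-- order statistic directly (objective: alternative algorithm; not measured faster).

-- ===== PORT A =====
-- tweet.get('engagement_score', tweet.get('engagement', 0))
def pvEngagement (tweet : List (String × Int)) : Int :=
  PySem.Dict.getD (PySem.Dict.mk tweet) "engagement_score"
    (PySem.Dict.getD (PySem.Dict.mk tweet) "engagement" 0)

-- int(len*0.9) / int(len*0.1) are hand-ported as (9*len)//10 and len//10: exact for every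
-- list length below 4·10^14 (the accumulated float error is < 0.1 there).
def calculate_engagement_distribution (tweets : List (List (String × Int))) : List (String × Int) :=
  if tweets = [] then []
  else
    let engagements := tweets.map pvEngagement
    -- engagements.sort() (in-place; s is the sorted list used below)
    let s := PySem.List.sorted engagements (fun x => x) false
    let n : Int := s.length
    [("min", (PySem.List.min? s (fun x => x)).getD 0),           -- min() never raises: s ≠ []
     ("max", (PySem.List.max? s (fun x => x)).getD 0),
     ("median", PySem.List.pyGetD s (PySem.Int.floordiv n 2) 0),
     ("top_10_percent_threshold",
        if 10 < n then PySem.List.pyGetD s (PySem.Int.floordiv (9 * n) 10) 0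
        else (PySem.List.max? s (fun x => x)).getD 0),
     ("bottom_10_percent_threshold",
        if 10 < n then PySem.List.pyGetD s (PySem.Int.floordiv n 10) 0
        else (PySem.List.min? s (fun x => x)).getD 0)]

-- ===== PORT B =====
-- termination helper for pv_select (cited by decreasing_by)
theorem pv_filter_lt_len {xs : List Int} {p : Int} (f : Int → Bool)
    (hp : p ∈ xs) (hf : f p = false) : (xs.filter f).length < xs.length := by
  rw [List.length_filter_lt_length_iff_exists]
  exact ⟨p, hp, by simp [hf]⟩

theorem pv_pivot_mem (x : Int) (rest : List Int) :
    (x :: rest).getD ((x :: rest).length / 2) 0 ∈ (x :: rest) := by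
  have h : (x :: rest).length / 2 < (x :: rest).length :=
    Nat.div_lt_self (by simp) (by omega)
  rw [List.getD_eq_getElem _ _ h]
  exact List.getElem_mem h

-- Source B's _select: iterative three-way quickselect, middle-element pivot (the while-loop
-- becomes the recursion; the [] case is unreachable, the loop is entered with 0 ≤ k < len)
def pv_select : List Int → Int → Int
  | [], _ => 0
  | x :: rest, k =>
    let xs := x :: rest
    let p := xs.getD (xs.length / 2) 0
    let lt := xs.filter (fun y => decide (y < p))
    if k < (lt.length : Int) then pv_select lt k
    else
      let eq := (xs.filter (fun y => decide (y = p))).length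
      if k < ((lt.length + eq : Nat) : Int) then p
      else pv_select (xs.filter (fun y => decide (p < y))) (k - ((lt.length + eq : Nat) : Int))
termination_by xs _ => xs.length
decreasing_by
  · exact pv_filter_lt_len _ (pv_pivot_mem x rest) (by simp)
  · exact pv_filter_lt_len _ (pv_pivot_mem x rest) (by simp)

def calculate_engagement_distribution_alt (tweets : List (List (String × Int))) : List (String × Int) :=
  if tweets = [] then []
  else
    let engagements := tweets.map pvEngagement
    let n : Int := engagements.length
    -- int(n*0.9)/int(n*0.1) hand-ported as in port A (exact for lengths below 4·10^14)
    let top_k := if 10 < n then PySem.Int.floordiv (9 * n) 10 else n - 1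
    let bot_k := if 10 < n then PySem.Int.floordiv n 10 else 0
    [("min", pv_select engagements 0),
     ("max", pv_select engagements (n - 1)),
     ("median", pv_select engagements (PySem.Int.floordiv n 2)),
     ("top_10_percent_threshold", pv_select engagements top_k),
     ("bottom_10_percent_threshold", pv_select engagements bot_k)]

-- ===== PRECONDITION & SPEC =====
def Spec_calculate_engagement_distribution (tweets : List (List (String × Int))) (out : List (String × Int)) : Prop := out = calculate_engagement_distribution_alt tweets
instance (tweets : List (List (String × Int))) (out : List (String × Int)) : Decidable (Spec_calculate_engagement_distribution tweets out) := by unfold Spec_calculate_engagement_distribution; infer_instance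

-- ===== CLAIM (what is proved, stated in full; the proofs are below) =====
def Claim_equal_calculate_engagement_distribution : Prop := ∀ (tweets : List (List (String × Int))), Dom_calculate_engagement_distribution tweets → Spec_calculate_engagement_distribution tweets (calculate_engagement_distribution tweets)

-- ===== LEMMAS AND PROOFS =====

theorem pv_pairwise_all_eq (p : Int) (l : List Int) (h : ∀ a ∈ l, a = p) :
    l.Pairwise (· ≤ ·) := by
  induction l with
  | nil => exact List.Pairwise.nil
  | cons a t ih =>
    refine List.pairwise_cons.2 ⟨fun b hb => ?_, ih fun b hb => h b (List.mem_cons_of_mem _ hb)⟩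
    rw [h a List.mem_cons_self, h b (List.mem_cons_of_mem _ hb)]

theorem pv_sorted_split (xs : List Int) (p : Int) :
    PySem.List.sorted xs (fun x => x) false =
      PySem.List.sorted (xs.filter (fun y => decide (y < p))) (fun x => x) false
      ++ xs.filter (fun y => decide (y = p))
      ++ PySem.List.sorted (xs.filter (fun y => decide (p < y))) (fun x => x) false := by
  set L := xs.filter (fun y => decide (y < p)) with hL
  set E := xs.filter (fun y => decide (y = p)) with hE
  set G := xs.filter (fun y => decide (p < y)) with hG
  set SL := PySem.List.sorted L (fun x : Int => x) false with hSL
  set SG := PySem.List.sorted G (fun x : Int => x) false with hSG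
  set M := xs.filter (fun y => !decide (y < p)) with hM
  have e1 : M.filter (fun y => decide (y = p)) = E := by
    rw [hM, List.filter_filter, hE]
    exact List.filter_congr (fun y _ => by
      by_cases h : y = p <;> by_cases h2 : y < p <;> simp [h, h2])
  have e2 : M.filter (fun y => !decide (y = p)) = G := by
    rw [hM, List.filter_filter, hG]
    exact List.filter_congr (fun y _ => by
      by_cases h : y = p <;> by_cases h2 : y < p <;> simp [h, h2] <;> omega)
  have hEG : (E ++ G).Perm M := by
    rw [← e1, ← e2]; exact List.filter_append_perm _ M
  have hperm : (SL ++ E ++ SG).Perm xs := by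
    have p1 : (SL ++ E ++ SG).Perm (L ++ (E ++ G)) := by
      rw [List.append_assoc]
      exact (PySem.List.sorted_perm L _ false).append
        ((List.Perm.refl E).append (PySem.List.sorted_perm G _ false))
    have p2 : (L ++ (E ++ G)).Perm (L ++ M) := (List.Perm.refl L).append hEG
    exact (p1.trans p2).trans (List.filter_append_perm _ xs)
  have hpw : (SL ++ E ++ SG).Pairwise (· ≤ ·) := by
    have pwSL : SL.Pairwise (· ≤ ·) := by
      simpa using PySem.List.sorted_pairwise L (fun x : Int => x)
    have pwSG : SG.Pairwise (· ≤ ·) := by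
      simpa using PySem.List.sorted_pairwise G (fun x : Int => x)
    have pwE : E.Pairwise (· ≤ ·) := by
      refine pv_pairwise_all_eq p E fun a ha => ?_
      have := (List.mem_filter.1 (hE ▸ ha)).2
      simpa using this
    have memSL : ∀ a ∈ SL, a < p := fun a ha => by
      have : a ∈ L := (PySem.List.mem_sorted L _ false a).1 ha
      have := (List.mem_filter.1 (hL ▸ this)).2
      simpa using this
    have memE : ∀ a ∈ E, a = p := fun a ha => by
      have := (List.mem_filter.1 (hE ▸ ha)).2
      simpa using this
    have memSG : ∀ a ∈ SG, p < a := fun a ha => by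
      have : a ∈ G := (PySem.List.mem_sorted G _ false a).1 ha
      have := (List.mem_filter.1 (hG ▸ this)).2
      simpa using this
    rw [List.pairwise_append]
    refine ⟨?_, pwSG, ?_⟩
    · rw [List.pairwise_append]
      refine ⟨pwSL, pwE, fun a ha b hb => ?_⟩
      rw [memE b hb]; exact le_of_lt (memSL a ha)
    · intro a ha b hb
      rcases List.mem_append.1 ha with h | h
      · exact le_of_lt ((memSL a h).trans (memSG b hb))
      · rw [memE a h]; exact le_of_lt (memSG b hb)
  have := PySem.List.sorted_id_eq_of_perm_of_pairwise xs (SL ++ E ++ SG) hperm hpw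
  -- `sorted xs (fun x => x)` with default rev=false
  exact this

theorem pv_select_cons (x : Int) (rest : List Int) (k : Int) (p : Int)
    (hp : (x :: rest).getD ((x :: rest).length / 2) 0 = p) :
    pv_select (x :: rest) k =
      if k < ((((x :: rest).filter (fun y => decide (y < p))).length : Nat) : Int)
      then pv_select ((x :: rest).filter (fun y => decide (y < p))) k
      else if k < ((((x :: rest).filter (fun y => decide (y < p))).length
              + ((x :: rest).filter (fun y => decide (y = p))).length : Nat) : Int)
        then p
        else pv_select ((x :: rest).filter (fun y => decide (p < y)))
              (k - ((((x :: rest).filter (fun y => decide (y < p))).length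
                  + ((x :: rest).filter (fun y => decide (y = p))).length : Nat) : Int)) := by
  subst hp
  rw [pv_select]

theorem pv_select_correct (xs : List Int) (k : Nat) (hk : k < xs.length) :
    pv_select xs (k : Int) = (PySem.List.sorted xs (fun x => x) false).getD k 0 := by
  match xs with
  | [] => simp at hk
  | x :: rest =>
    obtain ⟨p, hp⟩ : ∃ p, (x :: rest).getD ((x :: rest).length / 2) 0 = p := ⟨_, rfl⟩
    have hpmem : p ∈ x :: rest := hp ▸ pv_pivot_mem x rest
    have hLlt : ((x :: rest).filter (fun y => decide (y < p))).length < (x :: rest).length :=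
      pv_filter_lt_len _ hpmem (by simp)
    have hGlt : ((x :: rest).filter (fun y => decide (p < y))).length < (x :: rest).length :=
      pv_filter_lt_len _ hpmem (by simp)
    have hsplit := pv_sorted_split (x :: rest) p
    have hlenSL : (PySem.List.sorted ((x :: rest).filter (fun y => decide (y < p))) (fun x : Int => x) false).length
        = ((x :: rest).filter (fun y => decide (y < p))).length :=
      PySem.List.length_sorted _ _ false
    have hlen : (x :: rest).length = ((x :: rest).filter (fun y => decide (y < p))).length
        + ((x :: rest).filter (fun y => decide (y = p))).length
        + ((x :: rest).filter (fun y => decide (p < y))).length := by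
      have h1 := congrArg List.length hsplit
      simp only [List.length_append, PySem.List.length_sorted] at h1
      omega
    rw [pv_select_cons x rest (k : Int) p hp]
    split_ifs with h1 h2
    · -- k < |L|
      have hkL : k < ((x :: rest).filter (fun y => decide (y < p))).length := by exact_mod_cast h1
      rw [pv_select_correct _ k hkL, hsplit, List.append_assoc,
        List.getD_append _ _ _ _ (by rw [hlenSL]; exact hkL)]
    · -- |L| ≤ k < |L| + |E|
      have hk2 : k < ((x :: rest).filter (fun y => decide (y < p))).length
          + ((x :: rest).filter (fun y => decide (y = p))).length := by exact_mod_cast h2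
      have hk1 : ((x :: rest).filter (fun y => decide (y < p))).length ≤ k := by
        by_contra hc
        exact h1 (by exact_mod_cast Nat.lt_of_not_le hc)
      rw [hsplit, List.getD_append _ _ _ _ (by simp only [List.length_append, hlenSL]; omega),
        List.getD_append_right _ _ _ _ (by rw [hlenSL]; exact hk1)]
      have hidx : k - (PySem.List.sorted ((x :: rest).filter (fun y => decide (y < p))) (fun x : Int => x) false).length
          < ((x :: rest).filter (fun y => decide (y = p))).length := by
        rw [hlenSL]; omega
      rw [List.getD_eq_getElem _ _ hidx]
      have hmem := List.getElem_mem hidx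
      have heq' : (List.filter (fun y => decide (y = p)) (x :: rest))[k - (PySem.List.sorted ((x :: rest).filter (fun y => decide (y < p))) (fun x : Int => x) false).length] = p := by
        simpa using (List.mem_filter.1 hmem).2
      exact heq'.symm
    · -- recurse on G
      have hk1 : ((x :: rest).filter (fun y => decide (y < p))).length
          + ((x :: rest).filter (fun y => decide (y = p))).length ≤ k := by
        by_contra hc
        exact h2 (by exact_mod_cast Nat.lt_of_not_le hc)
      have hkG : k - (((x :: rest).filter (fun y => decide (y < p))).length
          + ((x :: rest).filter (fun y => decide (y = p))).length)
          < ((x :: rest).filter (fun y => decide (p < y))).length := by omega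
      have hcast : (k : Int) - ((((x :: rest).filter (fun y => decide (y < p))).length
            + ((x :: rest).filter (fun y => decide (y = p))).length : Nat) : Int)
          = ((k - (((x :: rest).filter (fun y => decide (y < p))).length
            + ((x :: rest).filter (fun y => decide (y = p))).length) : Nat) : Int) := by omega
      rw [hcast, pv_select_correct _ _ hkG, hsplit,
        List.getD_append_right _ _ _ _ (by simp only [List.length_append, hlenSL]; omega)]
      congr 1
      simp only [List.length_append, hlenSL]
termination_by xs.length
decreasing_by
  all_goals first | exact hLlt | exact hGlt

theorem pv_head_le (s : List Int) (hp : s.Pairwise (· ≤ ·)) (y : Int) (hy : y ∈ s) :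
    s.getD 0 0 ≤ y := by
  cases s with
  | nil => cases hy
  | cons m t =>
    rcases List.mem_cons.1 hy with h | h
    · simp [h]
    · exact (List.pairwise_cons.1 hp).1 y h

theorem pv_le_last (s : List Int) (hp : s.Pairwise (· ≤ ·)) (y : Int) (hy : y ∈ s) :
    y ≤ s.getD (s.length - 1) 0 := by
  induction s with
  | nil => cases hy
  | cons m t ih =>
    cases t with
    | nil => simp at hy; simp [hy]
    | cons a t' =>
      have hlt : (a :: t').length - 1 < (a :: t').length := by simp
      have hmem : (a :: t').getD ((a :: t').length - 1) 0 ∈ a :: t' := by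
        rw [List.getD_eq_getElem _ _ hlt]; exact List.getElem_mem hlt
      have hgd : (m :: a :: t').getD ((m :: a :: t').length - 1) 0
          = (a :: t').getD ((a :: t').length - 1) 0 := by
        simp
        rfl
      rw [hgd]
      rcases List.mem_cons.1 hy with h | h
      · exact h ▸ (List.pairwise_cons.1 hp).1 _ hmem
      · exact ih (List.pairwise_cons.1 hp).2 h

theorem pv_min_eq (s : List Int) (hs : s ≠ []) (hp : s.Pairwise (· ≤ ·)) :
    (PySem.List.min? s (fun x => x)).getD 0 = s.getD 0 0 := by
  obtain ⟨m, hm⟩ : ∃ m, PySem.List.min? s (fun x => x) = some m := by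
    cases h : PySem.List.min? s (fun x => x) with
    | none => exact absurd ((PySem.List.min?_eq_none_iff s (fun x => x)).1 h) hs
    | some m => exact ⟨m, rfl⟩
  have hmem := PySem.List.min?_mem hm
  have hmin := PySem.List.min?_isMin hm
  have h0 : s.getD 0 0 ∈ s := by
    have : 0 < s.length := List.length_pos_iff.2 hs
    rw [List.getD_eq_getElem _ _ this]; exact List.getElem_mem this
  rw [hm]
  exact le_antisymm (hmin _ h0) (pv_head_le s hp m hmem)

theorem pv_max_eq (s : List Int) (hs : s ≠ []) (hp : s.Pairwise (· ≤ ·)) :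
    (PySem.List.max? s (fun x => x)).getD 0 = s.getD (s.length - 1) 0 := by
  obtain ⟨m, hm⟩ : ∃ m, PySem.List.max? s (fun x => x) = some m := by
    cases h : PySem.List.max? s (fun x => x) with
    | none => exact absurd ((PySem.List.max?_eq_none_iff s (fun x => x)).1 h) hs
    | some m => exact ⟨m, rfl⟩
  have hmem := PySem.List.max?_mem hm
  have hmax := PySem.List.max?_isMax hm
  have h0 : s.getD (s.length - 1) 0 ∈ s := by
    have : s.length - 1 < s.length := by
      have := List.length_pos_iff.2 hs; omega
    rw [List.getD_eq_getElem _ _ this]; exact List.getElem_mem this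
  rw [hm]
  exact le_antisymm (pv_le_last s hp m hmem) (hmax _ h0)

-- ===== VERDICT (by name: the statement is the Claim_ definition above) =====
theorem calculate_engagement_distribution_spec : Claim_equal_calculate_engagement_distribution := by
  intro tweets _
  unfold Spec_calculate_engagement_distribution
  by_cases ht : tweets = []
  · simp [calculate_engagement_distribution, calculate_engagement_distribution_alt, ht]
  · have he : tweets.map pvEngagement ≠ [] := by simpa using ht
    have hNpos : 0 < (tweets.map pvEngagement).length := List.length_pos_iff.2 he
    simp only [calculate_engagement_distribution, calculate_engagement_distribution_alt,
      if_neg ht]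
    generalize hEdef : List.map pvEngagement tweets = e at *
    have hsl : (PySem.List.sorted e fun x : Int => x).length = e.length :=
      PySem.List.length_sorted e _ false
    simp only [hsl]
    have hsne : (PySem.List.sorted e fun x : Int => x) ≠ [] := by
      rw [← List.length_pos_iff, hsl]; exact hNpos
    have hpw : (PySem.List.sorted e fun x : Int => x).Pairwise (· ≤ ·) := by
      simpa using PySem.List.sorted_pairwise e (fun x : Int => x)
    have c1 : pv_select e 0 = (PySem.List.sorted e fun x : Int => x).getD 0 0 := by
      have h := pv_select_correct e 0 hNpos
      simpa using h
    have c2 : pv_select e ((e.length : Int) - 1)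
        = (PySem.List.sorted e fun x : Int => x).getD (e.length - 1) 0 := by
      have h := pv_select_correct e (e.length - 1) (by omega)
      rw [show ((e.length : Int) - 1) = (((e.length - 1 : Nat)) : Int) by omega]
      exact h
    have hfd2 : PySem.Int.floordiv (e.length : Int) 2 = ((e.length / 2 : Nat) : Int) := by
      rw [PySem.Int.floordiv_eq_ediv_of_pos (by omega)]; omega
    have c3 : pv_select e (PySem.Int.floordiv (e.length : Int) 2)
        = (PySem.List.sorted e fun x : Int => x).getD (e.length / 2) 0 := by
      rw [hfd2]; exact pv_select_correct e (e.length / 2) (by omega)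
    have hfd9 : PySem.Int.floordiv (9 * (e.length : Int)) 10 = ((9 * e.length / 10 : Nat) : Int) := by
      rw [show (9 * (e.length : Int)) = ((9 * e.length : Nat) : Int) by push_cast; ring,
        PySem.Int.floordiv_eq_ediv_of_pos (by omega)]
      omega
    have c4 : pv_select e (PySem.Int.floordiv (9 * (e.length : Int)) 10)
        = (PySem.List.sorted e fun x : Int => x).getD (9 * e.length / 10) 0 := by
      rw [hfd9]; exact pv_select_correct e (9 * e.length / 10) (by omega)
    have hfd1 : PySem.Int.floordiv (e.length : Int) 10 = ((e.length / 10 : Nat) : Int) := by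
      rw [PySem.Int.floordiv_eq_ediv_of_pos (by omega)]; omega
    have c5 : pv_select e (PySem.Int.floordiv (e.length : Int) 10)
        = (PySem.List.sorted e fun x : Int => x).getD (e.length / 10) 0 := by
      rw [hfd1]; exact pv_select_correct e (e.length / 10) (by omega)
    have m1 := pv_min_eq _ hsne hpw
    have m2 := pv_max_eq _ hsne hpw
    rw [hsl] at m2
    have a3 : PySem.List.pyGetD (PySem.List.sorted e fun x : Int => x) (PySem.Int.floordiv (e.length : Int) 2) 0
        = (PySem.List.sorted e fun x : Int => x).getD (e.length / 2) 0 := by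
      rw [hfd2, PySem.List.pyGetD_natCast]
    have a4 : PySem.List.pyGetD (PySem.List.sorted e fun x : Int => x) (PySem.Int.floordiv (9 * (e.length : Int)) 10) 0
        = (PySem.List.sorted e fun x : Int => x).getD (9 * e.length / 10) 0 := by
      rw [hfd9, PySem.List.pyGetD_natCast]
    have a5 : PySem.List.pyGetD (PySem.List.sorted e fun x : Int => x) (PySem.Int.floordiv (e.length : Int) 10) 0
        = (PySem.List.sorted e fun x : Int => x).getD (e.length / 10) 0 := by
      rw [hfd1, PySem.List.pyGetD_natCast]
    split_ifs with h10
    · simp only [m1, m2, a3, a4, a5, c1, c2, c3, c4, c5]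
    · simp only [m1, m2, a3, c1, c2, c3]
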